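-- pv_equiv track=rewrite | github.com/Arthur-Dauphole/Projet-BRAIN | Arthur_2/BRAIN_PROJECT/modules/detector.py | _rotate_normalized_pixels
-- ===== SOURCE A (Python) =====
-- def _rotate_normalized_pixels(pixels: frozenset, angle: int) -> frozenset:
--     """
--     Rotate normalized pixels by the given angle and re-normalize.
--     """
--     if not pixels:
--         return frozenset()
--
--     pixels_list = list(pixels)
--     h = max(p[0] for p in pixels_list) + 1
--     w = max(p[1] for p in pixels_list) + 1
--
--     rotated = []
--     for r, c in pixels_list:
--         if angle == 90:
--             new_r, new_c = c, h - 1 - r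
--         elif angle == 180:
--             new_r, new_c = h - 1 - r, w - 1 - c
--         elif angle == 270:
--             new_r, new_c = w - 1 - c, r
--         else:
--             new_r, new_c = r, c
--         rotated.append((new_r, new_c))
--
--     # Re-normalize
--     min_r = min(p[0] for p in rotated)
--     min_c = min(p[1] for p in rotated)
--
--     return frozenset((p[0] - min_r, p[1] - min_c) for p in rotated)
-- ===== SOURCE B (Python) =====
-- def _rotate_normalized_pixels(pixels: frozenset, angle: int) -> frozenset:
--     """
--     Rotate normalized pixels by the given angle and re-normalize,
--     folding the normalization offset into the rotation formula
--     (closed-form offsets from one min/max pass; no intermediate list,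
--     no second min pass over the rotated points).
--     """
--     if not pixels:
--         return frozenset()
--     rows = [p[0] for p in pixels]
--     cols = [p[1] for p in pixels]
--     rmin, rmax = min(rows), max(rows)
--     cmin, cmax = min(cols), max(cols)
--     if angle == 90:
--         return frozenset((c - cmin, rmax - r) for r, c in pixels)
--     if angle == 180:
--         return frozenset((rmax - r, cmax - c) for r, c in pixels)
--     if angle == 270:
--         return frozenset((cmax - c, r - rmin) for r, c in pixels)
--     return frozenset((r - rmin, c - cmin) for r, c in pixels)
-- ===== Notes on version B (the rewrite author's own statement) =====
-- stated objective: simpler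
-- what changed: B derives the re-normalization offsets in closed form from one min/max pass over the input and applies a single fused rotate-and-shift map, eliminating A's h/w computation, the intermediate rotated list, and the second min pass over it.
import Mathlib
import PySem

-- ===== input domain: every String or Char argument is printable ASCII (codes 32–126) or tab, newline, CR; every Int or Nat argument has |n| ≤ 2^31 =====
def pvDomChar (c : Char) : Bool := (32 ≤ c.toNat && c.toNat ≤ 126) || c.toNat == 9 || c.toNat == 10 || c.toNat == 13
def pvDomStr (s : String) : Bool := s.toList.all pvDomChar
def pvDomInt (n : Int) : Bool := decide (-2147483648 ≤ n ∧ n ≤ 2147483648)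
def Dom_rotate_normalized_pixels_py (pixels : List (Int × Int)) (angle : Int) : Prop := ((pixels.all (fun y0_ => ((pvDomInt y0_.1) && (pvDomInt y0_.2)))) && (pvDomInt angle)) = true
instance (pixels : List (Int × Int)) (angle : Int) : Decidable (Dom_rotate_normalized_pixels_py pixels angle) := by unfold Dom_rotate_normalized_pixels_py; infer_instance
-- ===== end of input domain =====

-- B folds the normalization offsets (closed form from one min/max pass over the input)
-- into the rotation map, removing A's h/w, the intermediate rotated list and the second
-- min pass; objective: simpler.

-- ===== PORT A =====
def rotate_normalized_pixels_py (pixels : List (Int × Int)) (angle : Int) : List (Int × Int) :=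
  if pixels = [] then []
  else
    let h : Int := ((PySem.List.max? (pixels.map Prod.fst) (fun x => x)).getD 0) + 1
    let w : Int := ((PySem.List.max? (pixels.map Prod.snd) (fun x => x)).getD 0) + 1
    let rotated := pixels.map (fun q =>
      if angle = 90 then (q.2, h - 1 - q.1)
      else if angle = 180 then (h - 1 - q.1, w - 1 - q.2)
      else if angle = 270 then (w - 1 - q.2, q.1)
      else (q.1, q.2))
    let min_r := (PySem.List.min? (rotated.map Prod.fst) (fun x => x)).getD 0
    let min_c := (PySem.List.min? (rotated.map Prod.snd) (fun x => x)).getD 0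
    PySem.Set.ofList (rotated.map (fun q => (q.1 - min_r, q.2 - min_c)))

-- ===== PORT B =====
def rotate_normalized_pixels_py_alt (pixels : List (Int × Int)) (angle : Int) : List (Int × Int) :=
  if pixels = [] then []
  else
    let rows := pixels.map Prod.fst
    let cols := pixels.map Prod.snd
    let rmin := (PySem.List.min? rows (fun x => x)).getD 0
    let rmax := (PySem.List.max? rows (fun x => x)).getD 0
    let cmin := (PySem.List.min? cols (fun x => x)).getD 0
    let cmax := (PySem.List.max? cols (fun x => x)).getD 0
    if angle = 90 then PySem.Set.ofList (pixels.map (fun q => (q.2 - cmin, rmax - q.1)))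
    else if angle = 180 then PySem.Set.ofList (pixels.map (fun q => (rmax - q.1, cmax - q.2)))
    else if angle = 270 then PySem.Set.ofList (pixels.map (fun q => (cmax - q.2, q.1 - rmin)))
    else PySem.Set.ofList (pixels.map (fun q => (q.1 - rmin, q.2 - cmin)))

-- ===== PRECONDITION & SPEC =====
def Spec_rotate_normalized_pixels_py (pixels : List (Int × Int)) (angle : Int) (out : List (Int × Int)) : Prop := out = rotate_normalized_pixels_py_alt pixels angle
instance (pixels : List (Int × Int)) (angle : Int) (out : List (Int × Int)) : Decidable (Spec_rotate_normalized_pixels_py pixels angle out) := by unfold Spec_rotate_normalized_pixels_py; infer_instance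

-- ===== CLAIM (what is proved, stated in full; the proofs are below) =====
def Claim_equal_rotate_normalized_pixels_py : Prop := ∀ (pixels : List (Int × Int)) (angle : Int), Dom_rotate_normalized_pixels_py pixels angle → Spec_rotate_normalized_pixels_py pixels angle (rotate_normalized_pixels_py pixels angle)

-- ===== LEMMAS AND PROOFS =====

-- min over (c - r) for r the first components equals c minus the max of the first components
theorem foldl_min_map_sub_fst (c : Int) : ∀ (xs : List (Int × Int)) (a : Int),
    (xs.map (fun q => c - q.1)).foldl min (c - a) = c - (xs.map Prod.fst).foldl max a := by
  intro xs
  induction xs with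
  | nil => intro a; simp
  | cons y ys ih =>
      intro a
      simp only [List.map_cons, List.foldl_cons]
      rw [show min (c - a) (c - y.1) = c - max a y.1 by omega]
      exact ih (max a y.1)

theorem foldl_min_map_sub_snd (c : Int) : ∀ (xs : List (Int × Int)) (a : Int),
    (xs.map (fun q => c - q.2)).foldl min (c - a) = c - (xs.map Prod.snd).foldl max a := by
  intro xs
  induction xs with
  | nil => intro a; simp
  | cons y ys ih =>
      intro a
      simp only [List.map_cons, List.foldl_cons]
      rw [show min (c - a) (c - y.2) = c - max a y.2 by omega]
      exact ih (max a y.2)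

-- ===== VERDICT (by name: the statement is the Claim_ definition above) =====
theorem rotate_normalized_pixels_py_spec : Claim_equal_rotate_normalized_pixels_py := by
  intro pixels angle _
  unfold Spec_rotate_normalized_pixels_py rotate_normalized_pixels_py rotate_normalized_pixels_py_alt
  cases pixels with
  | nil => simp
  | cons p ps =>
      simp only [if_neg (List.cons_ne_nil p ps)]
      by_cases h90 : angle = 90
      · simp only [h90, Int.reduceEq, reduceIte, List.map_cons, List.map_map, Function.comp_def,
          PySem.List.min?_id_cons, PySem.List.max?_id_cons, Option.getD_some]
        rw [foldl_min_map_sub_fst]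
        congr 1
        simp only [List.cons.injEq, Prod.mk.injEq]
        refine ⟨⟨?_, ?_⟩, List.map_congr_left fun q hq => ?_⟩
        · trivial
        · ring
        · simp only [Prod.mk.injEq]
          exact ⟨by trivial, by ring⟩
      · by_cases h180 : angle = 180
        · simp only [h180, Int.reduceEq, reduceIte, List.map_cons, List.map_map, Function.comp_def,
            PySem.List.min?_id_cons, PySem.List.max?_id_cons, Option.getD_some]
          rw [foldl_min_map_sub_fst, foldl_min_map_sub_snd]
          congr 1
          simp only [List.cons.injEq, Prod.mk.injEq]
          refine ⟨⟨?_, ?_⟩, List.map_congr_left fun q hq => ?_⟩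
          · ring
          · ring
          · simp only [Prod.mk.injEq]
            exact ⟨by ring, by ring⟩
        · by_cases h270 : angle = 270
          · simp only [h270, Int.reduceEq, reduceIte, List.map_cons, List.map_map, Function.comp_def,
              PySem.List.min?_id_cons, PySem.List.max?_id_cons, Option.getD_some]
            rw [foldl_min_map_sub_snd]
            congr 1
            simp only [List.cons.injEq, Prod.mk.injEq]
            refine ⟨⟨?_, ?_⟩, List.map_congr_left fun q hq => ?_⟩
            · ring
            · trivial
            · simp only [Prod.mk.injEq]
              exact ⟨by ring, by trivial⟩
          · simp only [h90, h180, h270, if_false, List.map_cons, List.map_map,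
              Function.comp_def, PySem.List.min?_id_cons, PySem.List.max?_id_cons, Option.getD_some]
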